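-- pv_equiv track=rewrite | github.com/frakkerman/vrp_competition | server/competition_master/helper.py | check_no_duplicate_visits
-- ===== SOURCE A (Python) =====
-- def check_no_duplicate_visits(solution):
--     visited_nodes = set()  # Track visited nodes across all routes
--
--     for route in solution['routes']:
--         for visit in route[1:-1]:  # Exclude the depots at the start and end
--             node_id = visit['node_id']
--             # Check if this node has already been visited in any route
--             if node_id in visited_nodes:
--                 return False  # Node visited more than once, fail the check
--             else:
--                 visited_nodes.add(node_id)
--     return True  # All nodes visited at most once across all routes, pass the check
-- ===== SOURCE B (Python) =====
-- def check_no_duplicate_visits(solution):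
--     # Sort every non-depot node_id, then a duplicate exists iff two equal
--     # ids end up adjacent: scan consecutive pairs of the sorted list.
--     all_ids = sorted(visit['node_id']
--                      for route in solution['routes']
--                      for visit in route[1:-1])
--     return all(a != b for a, b in zip(all_ids, all_ids[1:]))
-- ===== Notes on version B (the rewrite author's own statement) =====
-- stated objective: alternative
-- what changed: B sorts all non-depot node_ids and decides the result by scanning consecutive pairs of the sorted list for an equal adjacent pair, replacing A's hash-set scan with a per-element membership test and early return.
import Mathlib
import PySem

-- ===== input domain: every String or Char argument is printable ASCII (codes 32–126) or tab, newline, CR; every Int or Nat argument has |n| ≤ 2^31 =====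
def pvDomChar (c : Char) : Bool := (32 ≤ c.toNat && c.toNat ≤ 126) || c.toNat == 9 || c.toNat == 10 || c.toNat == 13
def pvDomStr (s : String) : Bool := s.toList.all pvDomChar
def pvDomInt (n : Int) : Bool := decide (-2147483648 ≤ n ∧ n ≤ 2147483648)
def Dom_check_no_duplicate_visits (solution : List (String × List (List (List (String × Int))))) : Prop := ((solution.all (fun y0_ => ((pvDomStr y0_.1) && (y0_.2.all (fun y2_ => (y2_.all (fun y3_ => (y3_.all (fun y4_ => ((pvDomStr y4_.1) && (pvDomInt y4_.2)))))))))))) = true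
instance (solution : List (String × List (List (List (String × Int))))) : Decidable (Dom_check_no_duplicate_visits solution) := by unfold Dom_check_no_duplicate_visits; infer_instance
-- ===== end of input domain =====

-- B sorts all non-depot node_ids and looks for an equal ADJACENT pair in the sorted
-- list (zip with its tail), replacing A's seen-set scan with early return — alternative
-- algorithm, same answer. Equivalence is about the return value; no argument is mutated.

-- ===== PORT A =====
-- visit['node_id'] ; the getD 0 default is never reached on Pre_ (key present)
def pvNodeId (v : List (String × Int)) : Int := (PySem.Dict.get? (PySem.Dict.mk v) "node_id").getD 0

-- inner 'for visit in route[1:-1]' loop: none = the early 'return False'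
def pvVisitLoop : List (List (String × Int)) → PySem.Set Int → Option (PySem.Set Int)
  | [], seen => some seen
  | v :: rest, seen =>
    let nid := pvNodeId v
    if PySem.Set.contains seen nid then none
    else pvVisitLoop rest (PySem.Set.add seen nid)

-- outer 'for route in solution["routes"]' loop
def pvRouteLoop : List (List (List (String × Int))) → PySem.Set Int → Bool
  | [], _ => true
  | r :: rest, seen =>
    match pvVisitLoop (PySem.List.slice r (some 1) (some (-1))) seen with
    | none => false
    | some seen' => pvRouteLoop rest seen'

def check_no_duplicate_visits (solution : List (String × List (List (List (String × Int))))) : Bool :=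
  match PySem.Dict.get? (PySem.Dict.mk solution) "routes" with
  | none => false  -- KeyError in Python; excluded by Pre_
  | some routes => pvRouteLoop routes PySem.Set.empty

-- ===== PORT B =====
def check_no_duplicate_visits_alt (solution : List (String × List (List (List (String × Int))))) : Bool :=
  match PySem.Dict.get? (PySem.Dict.mk solution) "routes" with
  | none => false  -- KeyError in Python; excluded by Pre_
  | some routes =>
    -- all_ids = sorted(generator)
    let all_ids := PySem.List.sorted
      (routes.flatMap (fun r => (PySem.List.slice r (some 1) (some (-1))).map pvNodeId))
      (fun x => x) false
    -- all(a != b for a, b in zip(all_ids, all_ids[1:]))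
    (all_ids.zip (PySem.List.slice all_ids (some 1) none)).all (fun p => p.1 != p.2)

-- ===== PRECONDITION & SPEC =====
-- Pre_ requires the 'routes' key and a 'node_id' key in every non-depot visit: without them
-- A raises KeyError — except that A returns False without reading visits after the first
-- duplicate, so a malformed visit after a duplicate is also excluded (B raises KeyError there).
def Pre_check_no_duplicate_visits (solution : List (String × List (List (List (String × Int))))) : Prop :=
  (PySem.Dict.get? (PySem.Dict.mk solution) "routes").isSome = true ∧
  ∀ r ∈ (PySem.Dict.get? (PySem.Dict.mk solution) "routes").getD [],
    ∀ v ∈ PySem.List.slice r (some 1) (some (-1)),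
      (PySem.Dict.get? (PySem.Dict.mk v) "node_id").isSome = true
instance (solution : List (String × List (List (List (String × Int))))) : Decidable (Pre_check_no_duplicate_visits solution) := by unfold Pre_check_no_duplicate_visits; infer_instance

def pvWitness_check_no_duplicate_visits : (List (String × List (List (List (String × Int))))) :=
  [("routes", [[[("node_id", 0)], [("node_id", 1)], [("node_id", 2)], [("node_id", 0)]]])]

def Spec_check_no_duplicate_visits (solution : List (String × List (List (List (String × Int))))) (out : Bool) : Prop := out = check_no_duplicate_visits_alt solution
instance (solution : List (String × List (List (List (String × Int))))) (out : Bool) : Decidable (Spec_check_no_duplicate_visits solution out) := by unfold Spec_check_no_duplicate_visits; infer_instance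

-- ===== CLAIM (what is proved, stated in full; the proofs are below) =====
def Claim_equal_check_no_duplicate_visits : Prop := ∀ (solution : List (String × List (List (List (String × Int))))), Dom_check_no_duplicate_visits solution → Pre_check_no_duplicate_visits solution → Spec_check_no_duplicate_visits solution (check_no_duplicate_visits solution)

-- ===== LEMMAS AND PROOFS =====

-- A's scan over a flat list of ids (the two loops of A flattened)
def pvIdLoop : List Int → PySem.Set Int → Option (PySem.Set Int)
  | [], seen => some seen
  | x :: rest, seen =>
    if PySem.Set.contains seen x then none
    else pvIdLoop rest (PySem.Set.add seen x)

lemma pvVisitLoop_eq_idLoop (vs : List (List (String × Int))) (s : PySem.Set Int) :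
    pvVisitLoop vs s = pvIdLoop (vs.map pvNodeId) s := by
  induction vs generalizing s with
  | nil => rfl
  | cons v rest ih =>
    simp only [pvVisitLoop, pvIdLoop, List.map]
    split_ifs <;> simp [ih]

lemma pvIdLoop_append (xs ys : List Int) (s : PySem.Set Int) :
    pvIdLoop (xs ++ ys) s = (pvIdLoop xs s).bind (fun s' => pvIdLoop ys s') := by
  induction xs generalizing s with
  | nil => rfl
  | cons x rest ih =>
    simp only [List.cons_append, pvIdLoop]
    split_ifs <;> simp [ih]

lemma pvRouteLoop_eq (routes : List (List (List (String × Int)))) (s : PySem.Set Int) :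
    pvRouteLoop routes s
      = (pvIdLoop (routes.flatMap (fun r => (PySem.List.slice r (some 1) (some (-1))).map pvNodeId)) s).isSome := by
  induction routes generalizing s with
  | nil => rfl
  | cons r rest ih =>
    simp only [pvRouteLoop, List.flatMap_cons, pvIdLoop_append, pvVisitLoop_eq_idLoop]
    cases pvIdLoop ((PySem.List.slice r (some 1) (some (-1))).map pvNodeId) s with
    | none => rfl
    | some s' => simpa using ih s'

lemma pvIdLoop_isSome (ids : List Int) (s : PySem.Set Int) :
    (pvIdLoop ids s).isSome = true ↔ ids.Nodup ∧ ∀ x ∈ ids, x ∉ s := by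
  induction ids generalizing s with
  | nil => simp [pvIdLoop]
  | cons x rest ih =>
    simp only [pvIdLoop, PySem.Set.contains_eq_listContains, List.contains_eq_mem]
    by_cases hm : x ∈ s
    · simp [hm]
    · rw [if_neg (by simp [hm]), ih]
      simp only [List.nodup_cons, List.mem_cons, PySem.Set.mem_add]
      constructor
      · rintro ⟨hnd, hall⟩
        push Not at hall
        exact ⟨⟨fun hxr => (hall x hxr).2 rfl, hnd⟩, fun y hy => by
          rcases hy with rfl | hy
          · exact hm
          · exact (hall y hy).1⟩
      · rintro ⟨⟨hxr, hnd⟩, hall⟩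
        refine ⟨hnd, fun y hy => ?_⟩
        rintro (h | rfl)
        · exact hall y (Or.inr hy) h
        · exact hxr hy

-- on a ≤-ordered list, no equal adjacent pair is exactly Nodup
lemma pvAdj_iff_nodup (s : List Int) (hs : s.Pairwise (· ≤ ·)) :
    ((s.zip s.tail).all (fun p => p.1 != p.2)) = true ↔ s.Nodup := by
  induction s with
  | nil => simp
  | cons a t ih =>
    cases t with
    | nil => simp
    | cons b r =>
      have hpt : (b :: r).Pairwise (· ≤ ·) := hs.tail
      have hab : a ≤ b := (List.pairwise_cons.mp hs).1 b (by simp)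
      have hbr : ∀ x ∈ r, b ≤ x := (List.pairwise_cons.mp hpt).1
      have har : ∀ x ∈ r, a ≤ x := fun x hx => le_trans hab (hbr x hx)
      simp only [List.tail_cons, List.zip_cons_cons, List.all_cons, Bool.and_eq_true,
        bne_iff_ne, ne_eq] at *
      rw [ih hpt]
      constructor
      · rintro ⟨hne, hnd⟩
        refine List.nodup_cons.mpr ⟨?_, hnd⟩
        intro hmem
        rcases List.mem_cons.mp hmem with rfl | hmem
        · exact hne rfl
        · have := hbr a hmem
          exact hne (le_antisymm hab this)
      · intro hnd
        have h1 := List.nodup_cons.mp hnd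
        exact ⟨fun h => h1.1 (by simp [h]), h1.2⟩

-- ===== VERDICT (by name: the statement is the Claim_ definition above) =====
theorem check_no_duplicate_visits_spec : Claim_equal_check_no_duplicate_visits := by
  intro solution _hdom hpre
  unfold Spec_check_no_duplicate_visits
  obtain ⟨hkey, _hvis⟩ := hpre
  cases hget : PySem.Dict.get? (PySem.Dict.mk solution) "routes" with
  | none => rw [hget] at hkey; exact Bool.noConfusion hkey
  | some routes =>
    set ids := routes.flatMap (fun r => (PySem.List.slice r (some 1) (some (-1))).map pvNodeId) with hids
    set s := PySem.List.sorted ids (fun x => x) false with hsdef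
    have e1 : check_no_duplicate_visits solution = pvRouteLoop routes PySem.Set.empty := by
      unfold check_no_duplicate_visits; rw [hget]
    have e2 : check_no_duplicate_visits_alt solution
        = ((s.zip (PySem.List.slice s (some 1) none)).all (fun p => p.1 != p.2)) := by
      unfold check_no_duplicate_visits_alt; rw [hget]
    rw [e1, e2, pvRouteLoop_eq, PySem.List.slice_from_one]
    have hA : (pvIdLoop ids PySem.Set.empty).isSome = true ↔ ids.Nodup := by
      rw [pvIdLoop_isSome]
      constructor
      · exact fun h => h.1
      · intro h; exact ⟨h, fun x _ hx => by simp [PySem.Set.empty] at hx⟩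
    have hperm : s.Perm ids := PySem.List.sorted_perm ids (fun x => x) false
    have hB : ((s.zip s.tail).all (fun p => p.1 != p.2)) = true ↔ ids.Nodup := by
      rw [pvAdj_iff_nodup s (by simpa using PySem.List.sorted_pairwise ids (fun x => x))]
      exact hperm.nodup_iff
    rw [Bool.eq_iff_iff, hA, hB]
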